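-- pv_equiv track=rewrite | github.com/HuLiangHu/Spiders | MaoyanSpiders/Maoyan/spiders/dailyinfo.py | decode_value
-- ===== SOURCE A (Python) =====
-- def decode_value(fontMapping,rawdata):
--     charts = []
--     for chart in rawdata:
--         decimalCode = ord(chart)
--         if str(decimalCode) in fontMapping:
--             charts.append(str(fontMapping[str(decimalCode)] ))
--         else:
--             charts.append(chart)
--     return ''.join(charts)
-- ===== SOURCE B (Python) =====
-- def decode_value(fontMapping, rawdata):
--     table = {ord(c): str(fontMapping[str(ord(c))]) for c in set(rawdata) if str(ord(c)) in fontMapping}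
--     return rawdata.translate(table)
-- ===== Notes on version B (the rewrite author's own statement) =====
-- stated objective: faster
-- what changed: B precomputes a translation table keyed by the ordinals of the distinct characters of rawdata and applies it with a single str.translate pass, instead of A's per-character Python loop that looks up each character, builds a list of pieces and joins them.
import Mathlib
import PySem

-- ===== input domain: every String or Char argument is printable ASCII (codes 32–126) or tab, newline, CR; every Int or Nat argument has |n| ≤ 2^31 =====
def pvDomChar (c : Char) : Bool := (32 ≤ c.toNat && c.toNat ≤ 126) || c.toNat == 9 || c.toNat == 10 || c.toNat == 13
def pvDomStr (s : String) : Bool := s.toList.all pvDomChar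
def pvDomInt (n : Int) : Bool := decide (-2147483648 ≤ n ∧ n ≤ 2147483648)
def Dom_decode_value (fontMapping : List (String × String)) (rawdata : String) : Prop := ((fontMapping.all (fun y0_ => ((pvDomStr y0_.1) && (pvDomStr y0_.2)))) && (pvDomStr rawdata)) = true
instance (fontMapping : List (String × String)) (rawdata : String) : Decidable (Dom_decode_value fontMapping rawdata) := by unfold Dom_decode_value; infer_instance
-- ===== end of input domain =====

-- B replaces A's per-character loop-and-branch by a translation table over the distinct
-- characters of rawdata plus one str.translate pass (idiomatic; same result proved equal).

-- shared primitive: Python dict lookup on the association list (first match)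
def pvLookup {κ ν : Type} [BEq κ] : List (κ × ν) → κ → Option ν
  | [], _ => none
  | (k, v) :: rest, key => if k == key then some v else pvLookup rest key

-- ===== PORT A =====
def decode_value (fontMapping : List (String × String)) (rawdata : String) : String :=
  let charts : List String := rawdata.toList.foldl (fun acc chart =>
    let decimalCode : Int := (chart.toNat : Int)
    match pvLookup fontMapping (PySem.Int.toStr decimalCode) with
    | some v => acc ++ [v]
    | none => acc ++ [String.ofList [chart]]) []
  PySem.Str.join "" charts

-- ===== PORT B =====
-- the dict comprehension over set(rawdata): table[ord(c)] = fontMapping[str(ord(c))]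
def pvTableB (fontMapping : List (String × String)) (chars : List Char) : List (Int × String) :=
  chars.foldl (fun d c =>
    match pvLookup fontMapping (PySem.Int.toStr (c.toNat : Int)) with
    | some v => d ++ [((c.toNat : Int), v)]
    | none => d) []

def decode_value_alt (fontMapping : List (String × String)) (rawdata : String) : String :=
  let table := pvTableB fontMapping (PySem.Set.ofList rawdata.toList)
  -- rawdata.translate(table)
  String.ofList (rawdata.toList.flatMap (fun c =>
    match pvLookup table (c.toNat : Int) with
    | some v => v.toList
    | none => [c]))

-- ===== PRECONDITION & SPEC =====
def Spec_decode_value (fontMapping : List (String × String)) (rawdata : String) (out : String) : Prop := out = decode_value_alt fontMapping rawdata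
instance (fontMapping : List (String × String)) (rawdata : String) (out : String) : Decidable (Spec_decode_value fontMapping rawdata out) := by unfold Spec_decode_value; infer_instance

-- ===== CLAIM (what is proved, stated in full; the proofs are below) =====
def Claim_equal_decode_value : Prop := ∀ (fontMapping : List (String × String)) (rawdata : String), Dom_decode_value fontMapping rawdata → Spec_decode_value fontMapping rawdata (decode_value fontMapping rawdata)




-- ===== LEMMAS AND PROOFS =====

theorem pvLookup_nil {κ ν : Type} [BEq κ] (key : κ) : pvLookup ([] : List (κ × ν)) key = none := rfl

theorem pvLookup_cons {κ ν : Type} [BEq κ] (k : κ) (v : ν) (rest : List (κ × ν)) (key : κ) :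
    pvLookup ((k, v) :: rest) key = if k == key then some v else pvLookup rest key := rfl

-- translation-table entry contributed by one character
def pvEntry (fontMapping : List (String × String)) (c : Char) : List (Int × String) :=
  match pvLookup fontMapping (PySem.Int.toStr (c.toNat : Int)) with
  | some v => [((c.toNat : Int), v)]
  | none => []

theorem pvTableB_eq_flatMap (fontMapping : List (String × String)) (chars : List Char) :
    pvTableB fontMapping chars = chars.flatMap (pvEntry fontMapping) := by
  have hfun : (fun (d : List (Int × String)) (c : Char) =>
      match pvLookup fontMapping (PySem.Int.toStr (c.toNat : Int)) with
      | some v => d ++ [((c.toNat : Int), v)]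
      | none => d) = fun d c => d ++ pvEntry fontMapping c := by
    funext d c
    unfold pvEntry
    cases h : pvLookup fontMapping (PySem.Int.toStr (c.toNat : Int)) <;> simp
  unfold pvTableB
  rw [hfun, PySem.List.foldl_append_eq_flatMap]
  exact List.nil_append _

theorem charToNat_int_inj {k c : Char} (h : (k.toNat : Int) = (c.toNat : Int)) : k = c := by
  have hn : k.toNat = c.toNat := by exact_mod_cast h
  exact Char.ext (UInt32.toNat_inj.mp hn)

theorem pvLookup_flatMap_entry (fontMapping : List (String × String)) (c : Char) :
    ∀ chars : List Char,
      pvLookup (chars.flatMap (pvEntry fontMapping)) (c.toNat : Int) =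
        if c ∈ chars then pvLookup fontMapping (PySem.Int.toStr (c.toNat : Int)) else none
  | [] => by
      rw [List.flatMap_nil, if_neg (List.not_mem_nil), pvLookup_nil]
  | k :: rest => by
      rw [List.flatMap_cons]
      by_cases hk : k = c
      · subst hk
        rw [if_pos (List.mem_cons_self)]
        cases h : pvLookup fontMapping (PySem.Int.toStr (k.toNat : Int)) with
        | some v =>
            have he : pvEntry fontMapping k = [((k.toNat : Int), v)] := by unfold pvEntry; rw [h]
            rw [he, List.singleton_append, pvLookup_cons, if_pos (by simp)]
        | none =>
            have he : pvEntry fontMapping k = [] := by unfold pvEntry; rw [h]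
            rw [he, List.nil_append, pvLookup_flatMap_entry fontMapping k rest]
            by_cases hr : k ∈ rest <;> simp [hr, h]
      · have htn : ¬ (((k.toNat : Int) == (c.toNat : Int)) = true) := by
          simp only [beq_iff_eq]
          exact fun h => hk (charToNat_int_inj h)
        have hmem : (c ∈ k :: rest) ↔ (c ∈ rest) := by
          simp [List.mem_cons, (Ne.symm hk : c ≠ k)]
        rw [if_congr hmem rfl rfl]
        cases h : pvLookup fontMapping (PySem.Int.toStr (k.toNat : Int)) with
        | some v =>
            have he : pvEntry fontMapping k = [((k.toNat : Int), v)] := by unfold pvEntry; rw [h]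
            rw [he, List.singleton_append, pvLookup_cons, if_neg htn,
              pvLookup_flatMap_entry fontMapping c rest]
        | none =>
            have he : pvEntry fontMapping k = [] := by unfold pvEntry; rw [h]
            rw [he, List.nil_append, pvLookup_flatMap_entry fontMapping c rest]

theorem pvLookup_table (fontMapping : List (String × String)) (chars : List Char) (c : Char) :
    pvLookup (pvTableB fontMapping chars) (c.toNat : Int) =
      if c ∈ chars then pvLookup fontMapping (PySem.Int.toStr (c.toNat : Int)) else none := by
  rw [pvTableB_eq_flatMap]; exact pvLookup_flatMap_entry fontMapping c chars

theorem joinNilC : ∀ (ps : List (List Char)), PySem.Chars.join [] ps = ps.flatMap id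
  | [] => by simp [PySem.Chars.join_nil]
  | [p] => by simp [PySem.Chars.join_singleton]
  | p :: q :: rest => by
      rw [PySem.Chars.join_cons_cons, joinNilC (q :: rest)]; simp

theorem joinE (parts : List String) : (PySem.Str.join "" parts).toList = parts.flatMap String.toList := by
  simp [PySem.Str.join, joinNilC, List.flatMap_map]

theorem flatMap_singleton_eq_map {α β : Type} (f : α → β) :
    ∀ l : List α, l.flatMap (fun x => [f x]) = l.map f
  | [] => rfl
  | x :: xs => by rw [List.flatMap_cons, flatMap_singleton_eq_map f xs]; rfl

theorem decode_value_spec : Claim_equal_decode_value := by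
  intro fontMapping rawdata _
  unfold Spec_decode_value decode_value decode_value_alt
  have hfun : (fun (acc : List String) (chart : Char) =>
      match pvLookup fontMapping (PySem.Int.toStr ((chart.toNat : Int))) with
      | some v => acc ++ [v]
      | none => acc ++ [String.ofList [chart]]) =
      fun acc chart => acc ++ (fun ch => [match pvLookup fontMapping (PySem.Int.toStr ((ch.toNat : Int))) with
        | some v => v
        | none => String.ofList [ch]]) chart := by
    funext acc chart
    cases h : pvLookup fontMapping (PySem.Int.toStr ((chart.toNat : Int))) <;> simp [h]
  simp only [hfun, PySem.List.foldl_append_eq_flatMap, List.nil_append]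
  rw [← String.ofList_toList (s := PySem.Str.join "" _), joinE]
  congr 1
  rw [flatMap_singleton_eq_map, List.flatMap_map]
  apply List.flatMap_congr
  intro c hc
  rw [pvLookup_table, if_pos ((PySem.Set.mem_ofList rawdata.toList c).mpr hc)]
  cases h : pvLookup fontMapping (PySem.Int.toStr ((c.toNat : Int))) <;> simp [h]
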